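-- pv_equiv track=rewrite | github.com/thunlp/DeepTHULAC | deepthulac/seg/seg_utils.py | spans2pos
-- ===== SOURCE A (Python) =====
-- def spans2pos(sent: str, spans, pos):
--     """ 将词的范围转换为分词加词性标注 """
--     segs = [sent[span[0]:span[1]+1] for span in spans]
--     idx = 0
--     for i in range(len(segs)):
--         seg = segs[i]
--         segs[i] += '_'+pos[idx]
--         idx += len(seg)
--     return segs
-- ===== SOURCE B (Python) =====
-- def spans2pos(sent: str, spans, pos):
--     """ 将词的范围转换为分词加词性标注 """
--     def go(rest, rem):
--         if not rest:
--             return []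
--         a, b = rest[0]
--         w = sent[a:b+1]
--         return [w + '_' + rem[0]] + go(rest[1:], rem[len(w):])
--     return go(list(spans), pos)
-- ===== Notes on version B (the rewrite author's own statement) =====
-- stated objective: alternative
-- what changed: Replaces A's index arithmetic (precomputed segs list mutated in place with a threaded idx counter into pos) by a recursion that carries no index at all: it peels one span at a time and consumes the pos string as a shrinking suffix, tagging each word with the suffix's first character.
import Mathlib
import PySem

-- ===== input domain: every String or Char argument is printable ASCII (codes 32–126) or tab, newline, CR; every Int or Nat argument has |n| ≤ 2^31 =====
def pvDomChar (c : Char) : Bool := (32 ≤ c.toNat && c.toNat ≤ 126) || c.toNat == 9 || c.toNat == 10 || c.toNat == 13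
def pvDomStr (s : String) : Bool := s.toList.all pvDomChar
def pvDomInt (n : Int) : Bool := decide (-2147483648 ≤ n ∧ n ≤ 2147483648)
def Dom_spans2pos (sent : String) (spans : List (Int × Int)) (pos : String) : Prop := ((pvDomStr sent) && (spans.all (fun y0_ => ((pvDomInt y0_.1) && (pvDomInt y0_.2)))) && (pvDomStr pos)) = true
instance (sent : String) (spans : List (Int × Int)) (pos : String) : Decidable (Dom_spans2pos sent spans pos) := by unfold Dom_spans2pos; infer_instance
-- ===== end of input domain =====

-- B replaces A's threaded idx counter into pos by a recursion that consumes pos as a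
-- shrinking suffix, slicing each word on the fly (alternative decomposition, same cost).


-- ===== PORT A =====
-- sent[span[0]:span[1]+1] for one span
def pvSliceA (sent : List Char) (sp : Int × Int) : List Char :=
  PySem.List.slice sent (some sp.1) (some (sp.2 + 1))

-- the for-loop: segs[i] += '_' + pos[idx]; idx += len(seg)
-- (pyGet? = none is Python's IndexError on pos[idx]; excluded by Pre_)
def pvLoopA (pos : List Char) : List (List Char) → Int → List (List Char)
  | [], _ => []
  | seg :: rest, idx =>
    match PySem.List.pyGet? pos idx with
    | some c => (seg ++ ['_', c]) :: pvLoopA pos rest (idx + (seg.length : Int))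
    | none => seg :: rest

def spans2pos (sent : String) (spans : List (Int × Int)) (pos : String) : List String :=
  (pvLoopA pos.toList (spans.map (pvSliceA sent.toList)) 0).map String.ofList

-- ===== PORT B =====
-- go(rest, rem): slice the first span's word, tag it with rem[0], recurse on rem[len(w):]
-- (pyGet? rem 0 = none is Python's IndexError on rem[0]; excluded by Pre_)
def pvGoB (sent : List Char) : List (Int × Int) → List Char → List (List Char)
  | [], _ => []
  | sp :: rest, rem =>
    let w := PySem.List.slice sent (some sp.1) (some (sp.2 + 1))
    match PySem.List.pyGet? rem 0 with
    | some c => (w ++ ['_', c]) :: pvGoB sent rest (PySem.List.slice rem (some (w.length : Int)) none)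
    | none => []

def spans2pos_alt (sent : String) (spans : List (Int × Int)) (pos : String) : List String :=
  (pvGoB sent.toList spans pos.toList).map String.ofList

-- ===== PRECONDITION & SPEC =====
-- Pre_ excludes exactly the inputs on which A raises IndexError on pos[idx]:
-- every cumulative character offset of a segment must be an index into pos.
def Pre_spans2pos (sent : String) (spans : List (Int × Int)) (pos : String) : Prop :=
  ∀ i, i < spans.length →
    (((spans.take i).map (fun sp => (PySem.List.slice sent.toList (some sp.1) (some (sp.2 + 1))).length)).sum < pos.toList.length)
instance (sent : String) (spans : List (Int × Int)) (pos : String) : Decidable (Pre_spans2pos sent spans pos) := by unfold Pre_spans2pos; infer_instance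

def pvWitness_spans2pos : String × (List (Int × Int)) × String := ("ab", [(0, 0), (1, 1)], "NV")

def Spec_spans2pos (sent : String) (spans : List (Int × Int)) (pos : String) (out : List String) : Prop := out = spans2pos_alt sent spans pos
instance (sent : String) (spans : List (Int × Int)) (pos : String) (out : List String) : Decidable (Spec_spans2pos sent spans pos out) := by unfold Spec_spans2pos; infer_instance

-- ===== CLAIM (what is proved, stated in full; the proofs are below) =====
def Claim_equal_spans2pos : Prop := ∀ (sent : String) (spans : List (Int × Int)) (pos : String), Dom_spans2pos sent spans pos → Pre_spans2pos sent spans pos → Spec_spans2pos sent spans pos (spans2pos sent spans pos)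

-- ===== LEMMAS AND PROOFS =====
-- Loop correspondence: A's threaded-idx loop over the precomputed segs equals B's recursion
-- on the spans carrying the suffix pos.drop t, as long as every offset reached is in range.
lemma pvLoop_eq_go (sent pos : List Char) (spans : List (Int × Int)) (t : Nat)
    (h : ∀ i, i < spans.length →
      t + ((spans.take i).map (fun sp => (pvSliceA sent sp).length)).sum < pos.length) :
    pvLoopA pos (spans.map (pvSliceA sent)) (t : Int) = pvGoB sent spans (pos.drop t) := by
  induction spans generalizing t with
  | nil => simp [pvLoopA, pvGoB]
  | cons sp rest ih =>
    have ht : t < pos.length := by simpa using h 0 (by simp)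
    obtain ⟨c, hc⟩ : ∃ c, pos[t]? = some c := ⟨pos[t], List.getElem?_eq_getElem ht⟩
    have hgetA : PySem.List.pyGet? pos (t : Int) = some c := by
      simpa [PySem.List.pyGet?_natCast] using hc
    have hgetB : PySem.List.pyGet? (pos.drop t) (0 : Int) = some c := by
      rw [show ((0 : Int)) = ((0 : Nat) : Int) from rfl, PySem.List.pyGet?_natCast]
      simpa [List.getElem?_drop] using hc
    have hrec := ih (t + (pvSliceA sent sp).length) (by
      intro i hi
      have := h (i + 1) (by simpa using Nat.succ_lt_succ hi)
      simpa [List.take_succ_cons, Nat.add_assoc] using this)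
    simp only [List.map_cons, pvLoopA, pvGoB, hgetA, hgetB]
    push_cast at hrec
    rw [hrec]
    simp [pvSliceA, PySem.List.slice_from_natCast, List.drop_drop]

-- ===== VERDICT (by name: the statement is the Claim_ definition above) =====
theorem spans2pos_spec : Claim_equal_spans2pos := by
  intro sent spans pos _ hpre
  unfold Spec_spans2pos spans2pos spans2pos_alt
  have h0 := pvLoop_eq_go sent.toList pos.toList spans 0 (by
    intro i hi
    simpa [pvSliceA] using hpre i hi)
  norm_num at h0
  rw [h0]
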